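-- pv_equiv track=rewrite | github.com/KimJinSuAI/CodingTestPractice | 프로그래머스/Level2/방문 길이(범위표현, 창의적 자료구조).py | didYouWent
-- ===== SOURCE A (Python) =====
-- def didYouWent(xy, before, stck):
--     A = []
--     B = []
--     for s in range(len(stck)):
--         if stck[s]==xy:
--             A.append(s)
--         elif stck[s]==before:
--             B.append(s)
--     for a in A:
--         for b in B:
--             if abs(a-b)==1:
--                 return True
--     return False
-- ===== SOURCE B (Python) =====
-- def didYouWent(xy, before, stck):
--     # elif in A means an occurrence of `before` only counts when it differs from xy,
--     # so equal labels can never match; otherwise adjacency of indices of xy and before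
--     # is exactly a consecutive pair (xy, before) or (before, xy).
--     if xy == before:
--         return False
--     for u, v in zip(stck, stck[1:]):
--         if (u == xy and v == before) or (u == before and v == xy):
--             return True
--     return False
-- ===== Notes on version B (the rewrite author's own statement) =====
-- stated objective: simpler
-- what changed: Instead of collecting all indices of xy and of before and searching every index pair for adjacency, B early-returns False when xy == before (A's elif makes a match impossible then) and otherwise does one pass over consecutive pairs of stck looking for (xy,before) or (before,xy).
import Mathlib
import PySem

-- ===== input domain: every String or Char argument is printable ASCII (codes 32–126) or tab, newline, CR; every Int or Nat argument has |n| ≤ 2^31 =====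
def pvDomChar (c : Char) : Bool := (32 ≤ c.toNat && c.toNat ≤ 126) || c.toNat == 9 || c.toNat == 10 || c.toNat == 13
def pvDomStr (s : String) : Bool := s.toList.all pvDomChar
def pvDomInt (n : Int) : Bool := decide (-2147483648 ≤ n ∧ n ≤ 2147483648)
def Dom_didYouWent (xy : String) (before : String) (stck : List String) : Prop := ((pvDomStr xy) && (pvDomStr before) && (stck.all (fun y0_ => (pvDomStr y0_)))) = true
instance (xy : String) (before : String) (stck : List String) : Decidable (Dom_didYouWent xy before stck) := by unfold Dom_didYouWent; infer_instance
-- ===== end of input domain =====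

-- B replaces A's index-collection plus nested adjacency search by a single scan of
-- consecutive pairs (an equivalent, shorter single-scan algorithm); A = B is proved on all inputs.

-- ===== PORT A =====
-- loop `for s in range(len(stck)): … stck[s] …` ported as a foldl over the (index, value)
-- pairs (PySem.List.enumerate stck 0), which visits the same s and stck[s] in the same order;
-- the elif chain is the nested if; the early-returning nested search is `any`/`any`.
def didYouWent (xy : String) (before : String) (stck : List String) : Bool :=
  let ab := (PySem.List.enumerate stck 0).foldl
    (fun (p : List Int × List Int) sv =>
      if sv.2 == xy then (p.1 ++ [sv.1], p.2)
      else if sv.2 == before then (p.1, p.2 ++ [sv.1])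
      else p) ([], [])
  ab.1.any (fun a => ab.2.any (fun b => (a - b).natAbs == 1))

-- ===== PORT B =====
-- `for u, v in zip(stck, stck[1:])` ported as structural recursion on the list.
def pairScan (xy before : String) : List String → Bool
  | u :: v :: rest =>
      if (u == xy && v == before) || (u == before && v == xy) then true
      else pairScan xy before (v :: rest)
  | _ => false

def didYouWent_alt (xy : String) (before : String) (stck : List String) : Bool :=
  if xy == before then false else pairScan xy before stck

-- ===== PRECONDITION & SPEC =====
def Spec_didYouWent (xy : String) (before : String) (stck : List String) (out : Bool) : Prop := out = didYouWent_alt xy before stck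
instance (xy : String) (before : String) (stck : List String) (out : Bool) : Decidable (Spec_didYouWent xy before stck out) := by unfold Spec_didYouWent; infer_instance

-- ===== CLAIM (what is proved, stated in full; the proofs are below) =====
def Claim_equal_didYouWent : Prop := ∀ (xy : String) (before : String) (stck : List String), Dom_didYouWent xy before stck → Spec_didYouWent xy before stck (didYouWent xy before stck)

-- ===== LEMMAS AND PROOFS =====

-- positions (from offset s) holding xy
def aIdx (xy : String) : List String → Int → List Int
  | [], _ => []
  | v :: r, s => (if v = xy then [s] else []) ++ aIdx xy r (s + 1)

-- positions (from offset s) holding before but not xy (the elif branch)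
def bIdx (xy before : String) : List String → Int → List Int
  | [], _ => []
  | v :: r, s =>
      (if v ≠ xy ∧ v = before then [s] else []) ++ bIdx xy before r (s + 1)

-- the shared adjacency property
def Adj (xy before : String) (l : List String) : Prop :=
  ∃ k : Nat, (l[k]? = some xy ∧ l[k + 1]? = some before) ∨
             (l[k]? = some before ∧ l[k + 1]? = some xy)

theorem foldA_spec (xy before : String) (l : List String) (s : Int)
    (as bs : List Int) :
    (PySem.List.enumerate l s).foldl
      (fun (p : List Int × List Int) sv =>
        if sv.2 == xy then (p.1 ++ [sv.1], p.2)
        else if sv.2 == before then (p.1, p.2 ++ [sv.1])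
        else p) (as, bs)
      = (as ++ aIdx xy l s, bs ++ bIdx xy before l s) := by
  induction l generalizing s as bs with
  | nil => simp [PySem.List.enumerate_nil, aIdx, bIdx]
  | cons v r ih =>
    rw [PySem.List.enumerate_cons]
    simp only [List.foldl_cons, beq_iff_eq] at ih ⊢
    by_cases h1 : v = xy
    · simp [h1, ih, aIdx, bIdx]
    · by_cases h2 : v = before
      · rw [h2] at h1
        simp [h1, h2, ih, aIdx, bIdx]
      · simp [h1, h2, ih, aIdx, bIdx]

theorem mem_aIdx (xy : String) (l : List String) (s a : Int) :
    a ∈ aIdx xy l s ↔ ∃ k : Nat, l[k]? = some xy ∧ a = s + k := by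
  induction l generalizing s with
  | nil => simp [aIdx]
  | cons v r ih =>
    simp only [aIdx, List.mem_append]
    constructor
    · rintro (h | h)
      · split_ifs at h with hv
        · simp at h
          exact ⟨0, by simp [hv, h]⟩
        · simp at h
      · obtain ⟨k, hk, ha⟩ := (ih (s + 1)).1 h
        exact ⟨k + 1, by simpa using hk, by omega⟩
    · rintro ⟨k, hk, ha⟩
      cases k with
      | zero =>
        left; simp at hk; simp [hk, ha]
      | succ k =>
        right
        exact (ih (s + 1)).2 ⟨k, by simpa using hk, by omega⟩

theorem mem_bIdx (xy before : String) (l : List String) (s b : Int) :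
    b ∈ bIdx xy before l s ↔
      before ≠ xy ∧ ∃ k : Nat, l[k]? = some before ∧ b = s + k := by
  induction l generalizing s with
  | nil => simp [bIdx]
  | cons v r ih =>
    simp only [bIdx, List.mem_append]
    constructor
    · rintro (h | h)
      · split_ifs at h with hv
        · simp at h
          exact ⟨by rw [← hv.2]; exact hv.1, 0, by simp [hv.2, h]⟩
        · simp at h
      · obtain ⟨hne, k, hk, hb⟩ := (ih (s + 1)).1 h
        exact ⟨hne, k + 1, by simpa using hk, by omega⟩
    · rintro ⟨hne, k, hk, hb⟩
      cases k with
      | zero =>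
        left; simp at hk
        simp [hk, hb, hne]
      | succ k =>
        right
        exact (ih (s + 1)).2 ⟨hne, k, by simpa using hk, by omega⟩

theorem didYouWent_eq_true_iff (xy before : String) (l : List String) :
    didYouWent xy before l = true ↔ before ≠ xy ∧ Adj xy before l := by
  unfold didYouWent
  rw [foldA_spec]
  simp only [List.nil_append, List.any_eq_true, beq_iff_eq]
  constructor
  · rintro ⟨a, ha, b, hb, hab⟩
    obtain ⟨k1, hk1, rfl⟩ := (mem_aIdx xy l 0 a).1 ha
    obtain ⟨hne, k2, hk2, rfl⟩ := (mem_bIdx xy before l 0 b).1 hb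
    refine ⟨hne, ?_⟩
    have : k1 = k2 + 1 ∨ k2 = k1 + 1 := by omega
    rcases this with h | h
    · exact ⟨k2, Or.inr ⟨hk2, h ▸ hk1⟩⟩
    · exact ⟨k1, Or.inl ⟨hk1, h ▸ hk2⟩⟩
  · rintro ⟨hne, k, h | h⟩
    · refine ⟨(k : Int), (mem_aIdx xy l 0 _).2 ⟨k, h.1, by omega⟩,
        ((k : Int) + 1), (mem_bIdx xy before l 0 _).2 ⟨hne, k + 1, by simpa using h.2, by push_cast; omega⟩, by omega⟩
    · refine ⟨((k : Int) + 1), (mem_aIdx xy l 0 _).2 ⟨k + 1, by simpa using h.2, by push_cast; omega⟩,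
        (k : Int), (mem_bIdx xy before l 0 _).2 ⟨hne, k, h.1, by omega⟩, by omega⟩

theorem pairScan_eq_true_iff (xy before : String) (l : List String) :
    pairScan xy before l = true ↔ Adj xy before l := by
  induction l with
  | nil => simp [pairScan, Adj]
  | cons u r ih =>
    cases r with
    | nil =>
      simp only [pairScan, Adj]
      constructor
      · intro h; simp at h
      · rintro ⟨k, h | h⟩ <;> rcases k with _ | k <;> simp at h
    | cons v rest =>
      rw [pairScan]
      constructor
      · intro h
        split_ifs at h with hc
        · simp only [Bool.or_eq_true, Bool.and_eq_true, beq_iff_eq] at hc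
          exact ⟨0, by rcases hc with ⟨h1, h2⟩ | ⟨h1, h2⟩ <;> simp [h1, h2]⟩
        · obtain ⟨k, hk⟩ := ih.1 h
          exact ⟨k + 1, by simpa using hk⟩
      · rintro ⟨k, hk⟩
        split_ifs with hc
        · rfl
        · apply ih.2
          cases k with
          | zero =>
            exfalso
            simp at hk hc
            rcases hk with ⟨h1, h2⟩ | ⟨h1, h2⟩
            · exact absurd h2 (hc.1 h1)
            · exact absurd h2 (hc.2 h1)
          | succ k => exact ⟨k, by simpa using hk⟩

theorem ab_eq (xy before : String) (l : List String) :
    didYouWent xy before l = didYouWent_alt xy before l := by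
  unfold didYouWent_alt
  by_cases h : xy = before
  · simp only [h, beq_self_eq_true, if_true]
    rw [← Bool.not_eq_true, didYouWent_eq_true_iff]
    simp
  · rw [if_neg (by simpa using h)]
    rcases hb : pairScan xy before l with _ | _
    · rw [← Bool.not_eq_true, didYouWent_eq_true_iff]
      rw [← Bool.not_eq_true, pairScan_eq_true_iff] at hb
      tauto
    · rw [didYouWent_eq_true_iff]
      exact ⟨Ne.symm h, (pairScan_eq_true_iff xy before l).1 hb⟩

-- ===== VERDICT (by name: the statement is the Claim_ definition above) =====
theorem didYouWent_spec : Claim_equal_didYouWent := by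
  intro xy before stck _
  exact ab_eq xy before stck
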